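-- pv_equiv track=rewrite | github.com/manthanrs/The_Peter_Clark_Algorithm | src/nr_dcov.py | has_directed_path
-- ===== SOURCE A (Python) =====
-- def has_directed_path(graph, start, end): #Depth-First Search (DFS)
--     n = len(graph)
--     visited = [False] * n
--     stack = [start]
--
--     while stack:
--         node = stack.pop()
--         if node == end:
--             return True
--         for neighbor in range(n):
--             if graph[node][neighbor] == 1 and graph[neighbor][node] == 0 and not visited[neighbor]:
--                 visited[neighbor] = True
--                 stack.append(neighbor)
--     return False
-- ===== SOURCE B (Python) =====
-- def has_directed_path(graph, start, end):
--     # Fixed-point saturation: grow the set of reachable nodes n rounds instead of a stack DFS.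
--     n = len(graph)
--     reach = {start}
--     for _ in range(n):
--         reach = reach | {v for u in reach for v in range(n)
--                          if graph[u][v] == 1 and graph[v][u] == 0}
--     return end in reach
-- ===== Notes on version B (the rewrite author's own statement) =====
-- stated objective: alternative
-- what changed: Replaced the explicit-stack DFS with visited flags by a fixed-point saturation: grow the set of reachable nodes for n rounds by adding all filtered successors of the current set, then test membership of end.
-- outside the precondition, e.g. on has_directed_path([[0, 0], [0, 0]], 5, 5): A returns True, B raises IndexError; on has_directed_path([[0, 0], [0]], 0, 1): A returns False, B returns False
import Mathlib
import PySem

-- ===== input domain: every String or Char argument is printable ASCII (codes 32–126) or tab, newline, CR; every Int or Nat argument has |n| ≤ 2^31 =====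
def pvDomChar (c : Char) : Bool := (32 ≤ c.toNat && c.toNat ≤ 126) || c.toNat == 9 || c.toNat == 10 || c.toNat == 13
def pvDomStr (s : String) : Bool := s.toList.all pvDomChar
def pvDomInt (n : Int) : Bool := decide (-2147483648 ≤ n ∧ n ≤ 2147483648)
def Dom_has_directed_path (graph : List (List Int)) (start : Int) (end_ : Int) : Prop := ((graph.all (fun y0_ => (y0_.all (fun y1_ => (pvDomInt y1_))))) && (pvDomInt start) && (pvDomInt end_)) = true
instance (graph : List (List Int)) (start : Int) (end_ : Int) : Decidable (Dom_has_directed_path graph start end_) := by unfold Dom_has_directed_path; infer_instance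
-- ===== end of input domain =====

-- B replaces A's explicit-stack DFS by an n-round fixed-point saturation of the reachable set
-- (alternative algorithm, same result; no argument is mutated by either version).

-- ===== PORT A =====
-- graph[u][v]: total form of Python's double indexing; the default is never reached on Pre_ inputs.
def pvCell (graph : List (List Int)) (u v : Int) : Int :=
  PySem.List.pyGetD (PySem.List.pyGetD graph u []) v 0

-- the 'while stack:' loop of A; fuel 2*n+2 provably bounds the number of iterations
-- (each pop removes one stack entry, each push flips one visited flag false→true; see pvLoopA_fuel lemmas below)
def pvLoopA (graph : List (List Int)) (n : Nat) (end_ : Int) :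
    Nat → List Bool → List Int → Bool
  | 0, _, _ => false
  | fuel + 1, visited, stack =>
    match stack with
    | [] => false
    | node :: rest =>      -- stack kept top-first: cons = Python's append, head = Python's pop()
      if node = end_ then true
      else
        let st := (PySem.List.pyRange 0 n 1).foldl
          (fun (s : List Bool × List Int) neighbor =>
            if pvCell graph node neighbor == 1 && pvCell graph neighbor node == 0
                && !(s.1.getD neighbor.toNat false)
            then (s.1.set neighbor.toNat true, neighbor :: s.2)
            else s)
          (visited, rest)
        pvLoopA graph n end_ fuel st.1 st.2

def has_directed_path (graph : List (List Int)) (start : Int) (end_ : Int) : Bool :=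
  let n := graph.length
  pvLoopA graph n end_ (2 * n + 2) (List.replicate n false) [start]

-- ===== PORT B =====
-- {v for u in reach for v in range(n) if graph[u][v] == 1 and graph[v][u] == 0}
def pvSuccs (graph : List (List Int)) (n : Nat) (reach : PySem.Set Int) : List Int :=
  reach.flatMap (fun u =>
    (PySem.List.pyRange 0 n 1).filter (fun v =>
      pvCell graph u v == 1 && pvCell graph v u == 0))

def has_directed_path_alt (graph : List (List Int)) (start : Int) (end_ : Int) : Bool :=
  let n := graph.length
  let r := (PySem.List.pyRange 0 n 1).foldl
    (fun (reach : PySem.Set Int) _ =>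
      PySem.Set.union reach (PySem.Set.ofList (pvSuccs graph n reach)))
    (PySem.Set.ofList [start])
  PySem.Set.contains r end_

-- ===== PRECONDITION & SPEC =====
-- Pre_ excludes the inputs on which indexing goes out of range (start outside [-n, n) or a row
-- shorter than n), where Python A in general raises IndexError; on a few of those A still returns
-- (start == end short-circuits before any indexing, and a short row can be unreachable) but B may
-- raise IndexError there, so they stay outside the claim.
def Pre_has_directed_path (graph : List (List Int)) (start : Int) (end_ : Int) : Prop :=
  graph = [] ∨ ((∀ row ∈ graph, graph.length ≤ row.length) ∧
    -(graph.length : Int) ≤ start ∧ start < (graph.length : Int))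
instance (graph : List (List Int)) (start : Int) (end_ : Int) : Decidable (Pre_has_directed_path graph start end_) := by unfold Pre_has_directed_path; infer_instance

def pvWitness_has_directed_path : List (List Int) × Int × Int := ([[0, 1], [0, 0]], 0, 1)

def Spec_has_directed_path (graph : List (List Int)) (start : Int) (end_ : Int) (out : Bool) : Prop := out = has_directed_path_alt graph start end_
instance (graph : List (List Int)) (start : Int) (end_ : Int) (out : Bool) : Decidable (Spec_has_directed_path graph start end_ out) := by unfold Spec_has_directed_path; infer_instance

-- ===== CLAIM (what is proved, stated in full; the proofs are below) =====
def Claim_equal_has_directed_path : Prop := ∀ (graph : List (List Int)) (start : Int) (end_ : Int), Dom_has_directed_path graph start end_ → Pre_has_directed_path graph start end_ → Spec_has_directed_path graph start end_ (has_directed_path graph start end_)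

-- ===== LEMMAS AND PROOFS =====

-- the edge relation both programs filter by: v is a node index and graph[u][v] == 1, graph[v][u] == 0
def pvE (graph : List (List Int)) (n : Nat) (u v : Int) : Prop :=
  (0 ≤ v ∧ v < (n : Int)) ∧ pvCell graph u v = 1 ∧ pvCell graph v u = 0

-- ---------- A-side: the stack loop computes reachability ----------

-- the body of A's inner 'for neighbor in range(n)' loop (same lambda as in pvLoopA)
def pvStepA (graph : List (List Int)) (node : Int) :
    (List Bool × List Int) → Int → (List Bool × List Int) :=
  fun s neighbor =>
    if pvCell graph node neighbor == 1 && pvCell graph neighbor node == 0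
        && !(s.1.getD neighbor.toNat false)
    then (s.1.set neighbor.toNat true, neighbor :: s.2)
    else s

theorem pvLoopA_succ (graph : List (List Int)) (n : Nat) (end_ : Int) (fuel : Nat)
    (vis : List Bool) (node : Int) (rest : List Int) :
    pvLoopA graph n end_ (fuel + 1) vis (node :: rest) =
      if node = end_ then true
      else
        (fun st => pvLoopA graph n end_ fuel st.1 st.2)
          ((PySem.List.pyRange 0 n 1).foldl (pvStepA graph node) (vis, rest)) := rfl

theorem pvFoldA_fst_length (graph : List (List Int)) (node : Int) (L : List Int) :
    ∀ (vis : List Bool) (stk : List Int),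
      ((L.foldl (pvStepA graph node) (vis, stk)).1).length = vis.length := by
  induction L with
  | nil => intro vis stk; rfl
  | cons x L ih =>
      intro vis stk
      simp only [List.foldl_cons, pvStepA]
      split
      · rw [ih]; simp
      · exact ih vis stk

theorem pvFoldA_mark_mono (graph : List (List Int)) (node : Int) (L : List Int) :
    ∀ (vis : List Bool) (stk : List Int) (j : Nat),
      vis.getD j false = true →
      ((L.foldl (pvStepA graph node) (vis, stk)).1).getD j false = true := by
  induction L with
  | nil => intro vis stk j h; exact h
  | cons x L ih =>
      intro vis stk j h
      simp only [List.foldl_cons, pvStepA]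
      split
      · apply ih
        by_cases hj : x.toNat = j
        · subst hj
          have hlt : x.toNat < vis.length := by
            by_contra hge
            rw [List.getD_eq_default] at h
            · exact absurd h (by simp)
            · omega
          simp [List.getD_eq_getElem?_getD, hlt]
        · rw [List.getD_eq_getElem?_getD, List.getElem?_set_ne hj, ← List.getD_eq_getElem?_getD]
          exact h
      · exact ih vis stk j h

theorem pvFoldA_stack_mono (graph : List (List Int)) (node : Int) (L : List Int) :
    ∀ (vis : List Bool) (stk : List Int) (v : Int),
      v ∈ stk → v ∈ (L.foldl (pvStepA graph node) (vis, stk)).2 := by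
  induction L with
  | nil => intro vis stk v h; exact h
  | cons x L ih =>
      intro vis stk v h
      simp only [List.foldl_cons, pvStepA]
      split
      · exact ih _ _ v (List.mem_cons_of_mem _ h)
      · exact ih vis stk v h

theorem pvFoldA_stack_src (graph : List (List Int)) (node : Int) (L : List Int) :
    ∀ (vis : List Bool) (stk : List Int) (v : Int),
      v ∈ (L.foldl (pvStepA graph node) (vis, stk)).2 →
      v ∈ stk ∨ (v ∈ L ∧ pvCell graph node v = 1 ∧ pvCell graph v node = 0) := by
  induction L with
  | nil => intro vis stk v h; exact Or.inl h
  | cons x L ih =>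
      intro vis stk v h
      simp only [List.foldl_cons, pvStepA] at h
      split at h
      · rename_i hcond
        rcases ih _ _ v h with h' | h'
        · rcases List.mem_cons.mp h' with h'' | h''
          · subst h''
            simp only [Bool.and_eq_true, beq_iff_eq] at hcond
            exact Or.inr ⟨List.mem_cons_self, hcond.1.1, hcond.1.2⟩
          · exact Or.inl h''
        · exact Or.inr ⟨List.mem_cons_of_mem _ h'.1, h'.2⟩
      · rcases ih _ _ v h with h' | h'
        · exact Or.inl h'
        · exact Or.inr ⟨List.mem_cons_of_mem _ h'.1, h'.2⟩

theorem pvFoldA_new_marks (graph : List (List Int)) (node : Int) (L : List Int)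
    (hL : ∀ v ∈ L, 0 ≤ v) :
    ∀ (vis : List Bool) (stk : List Int) (j : Nat),
      ((L.foldl (pvStepA graph node) (vis, stk)).1).getD j false = true →
      vis.getD j false = true ∨ ((j : Int) ∈ (L.foldl (pvStepA graph node) (vis, stk)).2) := by
  induction L with
  | nil => intro vis stk j h; exact Or.inl h
  | cons x L ih =>
      intro vis stk j h
      have hx : (0:Int) ≤ x := hL x List.mem_cons_self
      have hL' : ∀ v ∈ L, (0:Int) ≤ v := fun v hv => hL v (List.mem_cons_of_mem _ hv)
      simp only [List.foldl_cons, pvStepA] at h ⊢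
      by_cases hc : (pvCell graph node x == 1 && pvCell graph x node == 0
          && !vis.getD x.toNat false) = true
      · rw [if_pos hc] at h ⊢
        rcases ih hL' _ _ j h with h' | h'
        · by_cases hj : x.toNat = j
          · right
            have hjx : (j : Int) = x := by
              rw [← hj]; exact Int.toNat_of_nonneg hx
            rw [hjx]
            exact pvFoldA_stack_mono graph node L _ _ x List.mem_cons_self
          · left
            rw [List.getD_eq_getElem?_getD, List.getElem?_set_ne hj,
              ← List.getD_eq_getElem?_getD] at h'
            exact h'
        · exact Or.inr h'
      · rw [if_neg hc] at h ⊢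
        rcases ih hL' _ _ j h with h' | h'
        · exact Or.inl h'
        · exact Or.inr h'

theorem pvFoldA_succs_marked (graph : List (List Int)) (node : Int) (L : List Int) :
    ∀ (vis : List Bool) (stk : List Int),
      (∀ v ∈ L, 0 ≤ v ∧ v.toNat < vis.length) →
      ∀ v ∈ L, pvCell graph node v = 1 → pvCell graph v node = 0 →
        ((L.foldl (pvStepA graph node) (vis, stk)).1).getD v.toNat false = true := by
  induction L with
  | nil => intro vis stk _ v hv; exact absurd hv (List.not_mem_nil)
  | cons x L ih =>
      intro vis stk hB v hv h1 h0
      rcases List.mem_cons.mp hv with hv' | hv'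
      · subst hv'
        simp only [List.foldl_cons, pvStepA, h1, h0]
        by_cases hm : vis.getD v.toNat false = true
        · simp only [hm]
          simp only [beq_self_eq_true, Bool.and_self, Bool.not_true, Bool.and_false]
          exact pvFoldA_mark_mono graph node L vis stk v.toNat hm
        · have hm' : vis.getD v.toNat false = false := by
            cases h : vis.getD v.toNat false
            · rfl
            · exact absurd h hm
          simp only [hm']
          simp only [beq_self_eq_true, Bool.and_self, Bool.not_false, if_true]
          apply pvFoldA_mark_mono
          have hlt : v.toNat < vis.length := (hB v hv).2
          simp [List.getD_eq_getElem?_getD, hlt]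
      · simp only [List.foldl_cons, pvStepA]
        split
        · apply ih _ _ _ v hv' h1 h0
          intro w hw
          refine ⟨(hB w (List.mem_cons_of_mem _ hw)).1, ?_⟩
          rw [List.length_set]
          exact (hB w (List.mem_cons_of_mem _ hw)).2
        · exact ih _ _ (fun w hw => hB w (List.mem_cons_of_mem _ hw)) v hv' h1 h0

theorem pvCountFalse_set (xs : List Bool) (j : Nat) (h : j < xs.length)
    (hf : xs.getD j false = false) :
    (xs.set j true).count false + 1 = xs.count false := by
  have h1 : xs.getD j false = xs[j] := List.getD_eq_getElem xs false h
  rw [h1] at hf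
  rw [List.count_set h]
  have hmem : false ∈ xs := by rw [← hf]; exact List.getElem_mem h
  have hpos : 0 < xs.count false := List.count_pos_iff.mpr hmem
  simp [hf]
  omega

theorem pvFoldA_measure (graph : List (List Int)) (node : Int) (L : List Int) :
    ∀ (vis : List Bool) (stk : List Int),
      (∀ v ∈ L, v.toNat < vis.length) →
      2 * ((L.foldl (pvStepA graph node) (vis, stk)).1).count false
          + ((L.foldl (pvStepA graph node) (vis, stk)).2).length
        ≤ 2 * vis.count false + stk.length := by
  induction L with
  | nil => intro vis stk _; exact le_refl _
  | cons x L ih =>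
      intro vis stk hB
      simp only [List.foldl_cons, pvStepA]
      split
      · rename_i hcond
        simp only [Bool.and_eq_true, Bool.not_eq_true'] at hcond
        have hx : x.toNat < vis.length := hB x List.mem_cons_self
        have hcount := pvCountFalse_set vis x.toNat hx hcond.2
        have := ih (vis.set x.toNat true) (x :: stk)
          (fun v hv => by rw [List.length_set]; exact hB v (List.mem_cons_of_mem _ hv))
        simp only [List.length_cons] at this
        omega
      · exact ih vis stk (fun v hv => hB v (List.mem_cons_of_mem _ hv))

-- the chain argument: a marked node on a path to end_ yields a stack node on a path to end_
theorem pvChain (graph : List (List Int)) (n : Nat) (end_ : Int)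
    (vis : List Bool) (stack : List Int) (P : Int → Prop)
    (mstk : ∀ j : Nat, j < n → vis.getD j false = true → ((j : Int) ∈ stack ∨ P j))
    (Pexp : ∀ u, P u → ∀ v, pvE graph n u v → vis.getD v.toNat false = true)
    (Pend : ∀ u, P u → u ≠ end_) :
    ∀ w, Relation.ReflTransGen (pvE graph n) w end_ → 0 ≤ w → w < (n : Int) →
      vis.getD w.toNat false = true →
      ∃ s ∈ stack, Relation.ReflTransGen (pvE graph n) s end_ := by
  intro w hw
  induction hw using Relation.ReflTransGen.head_induction_on with
  | refl =>
      intro h0 hn hm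
      have hj : end_.toNat < n := by omega
      rcases mstk end_.toNat hj hm with hs | hp
      · rw [Int.toNat_of_nonneg h0] at hs
        exact ⟨end_, hs, Relation.ReflTransGen.refl⟩
      · exfalso
        exact Pend _ hp (by rw [Int.toNat_of_nonneg h0])
  | head hstep htail ih =>
      rename_i a c
      intro h0 hn hm
      have hj : a.toNat < n := by omega
      rcases mstk a.toNat hj hm with hs | hp
      · rw [Int.toNat_of_nonneg h0] at hs
        exact ⟨a, hs, Relation.ReflTransGen.head hstep htail⟩
      · rw [Int.toNat_of_nonneg h0] at hp
        have hmc := Pexp a hp c hstep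
        exact ih hstep.1.1 hstep.1.2 hmc

theorem pvLoopA_eq (graph : List (List Int)) (n : Nat) (end_ : Int) :
    ∀ (fuel : Nat) (vis : List Bool) (stack : List Int) (P : Int → Prop),
      vis.length = n →
      2 * vis.count false + stack.length < fuel →
      (∀ j : Nat, j < n → vis.getD j false = true → ((j : Int) ∈ stack ∨ P j)) →
      (∀ u, P u → ∀ v, pvE graph n u v → vis.getD v.toNat false = true) →
      (∀ u, P u → u ≠ end_) →
      (pvLoopA graph n end_ fuel vis stack = true ↔
        ∃ s ∈ stack, Relation.ReflTransGen (pvE graph n) s end_) := by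
  intro fuel
  induction fuel with
  | zero => intro vis stack P _ hf; omega
  | succ fuel ih =>
      intro vis stack P hlen hf mstk Pexp Pend
      match stack with
      | [] =>
        simp only [pvLoopA]
        simp
      | node :: rest =>
        by_cases hend : node = end_
        · subst hend
          rw [pvLoopA_succ, if_pos rfl]
          exact iff_of_true rfl ⟨node, List.mem_cons_self, Relation.ReflTransGen.refl⟩
        · rw [pvLoopA_succ, if_neg hend]
          set st := (PySem.List.pyRange 0 n 1).foldl (pvStepA graph node) (vis, rest) with hst
          have hRangeB : ∀ v ∈ PySem.List.pyRange 0 (n:Int) 1, (0:Int) ≤ v ∧ v.toNat < vis.length := by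
            intro v hv
            rw [PySem.List.mem_pyRange_one] at hv
            constructor
            · exact hv.1
            · rw [hlen]; omega
          -- new ghost set
          set P' := fun u => P u ∨ u = node with hP'
          have hlen' : st.1.length = n := by rw [hst, pvFoldA_fst_length]; exact hlen
          have mstk' : ∀ j : Nat, j < n → st.1.getD j false = true → ((j : Int) ∈ st.2 ∨ P' j) := by
            intro j hj hm
            rcases pvFoldA_new_marks graph node _ (fun v hv => (hRangeB v hv).1) vis rest j hm with hold | hnew
            · rcases mstk j hj hold with hs | hp
              · rcases List.mem_cons.mp hs with h' | h'
                · exact Or.inr (Or.inr h')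
                · exact Or.inl (pvFoldA_stack_mono graph node _ vis rest _ h')
              · exact Or.inr (Or.inl hp)
            · exact Or.inl hnew
          have Pexp' : ∀ u, P' u → ∀ v, pvE graph n u v → st.1.getD v.toNat false = true := by
            intro u hu v hv
            rcases hu with hu | hu
            · exact pvFoldA_mark_mono graph node _ vis rest _ (Pexp u hu v hv)
            · subst hu
              apply pvFoldA_succs_marked graph u _ vis rest hRangeB v _ hv.2.1 hv.2.2
              rw [PySem.List.mem_pyRange_one]
              exact ⟨hv.1.1, hv.1.2⟩
          have Pend' : ∀ u, P' u → u ≠ end_ := by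
            intro u hu
            rcases hu with hu | hu
            · exact Pend u hu
            · subst hu; exact hend
          have hmeas : 2 * st.1.count false + st.2.length ≤ 2 * vis.count false + rest.length := by
            rw [hst]
            exact pvFoldA_measure graph node _ vis rest (fun v hv => (hRangeB v hv).2)
          have hf' : 2 * st.1.count false + st.2.length < fuel := by
            simp only [List.length_cons] at hf
            omega
          rw [ih st.1 st.2 P' hlen' hf' mstk' Pexp' Pend']
          -- the two existentials agree
          constructor
          · rintro ⟨s, hs, hpath⟩
            rcases pvFoldA_stack_src graph node _ vis rest s hs with h' | h'
            · exact ⟨s, List.mem_cons_of_mem _ h', hpath⟩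
            · refine ⟨node, List.mem_cons_self, Relation.ReflTransGen.head ?_ hpath⟩
              have := (PySem.List.mem_pyRange_one).mp h'.1
              exact ⟨⟨this.1, this.2⟩, h'.2.1, h'.2.2⟩
          · rintro ⟨s, hs, hpath⟩
            rcases List.mem_cons.mp hs with h' | h'
            · subst h'
              rcases Relation.ReflTransGen.cases_head hpath with h'' | ⟨c, hstep, htail⟩
              · exact absurd h'' hend
              · have hmc := Pexp' s (Or.inr rfl) c hstep
                exact pvChain graph n end_ st.1 st.2 P' mstk' Pexp' Pend'
                  c htail hstep.1.1 hstep.1.2 hmc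
            · exact ⟨s, pvFoldA_stack_mono graph node _ vis rest _ h', hpath⟩

theorem pvA_iff (graph : List (List Int)) (start end_ : Int) :
    has_directed_path graph start end_ = true ↔
      Relation.ReflTransGen (pvE graph graph.length) start end_ := by
  unfold has_directed_path
  rw [pvLoopA_eq graph graph.length end_ (2 * graph.length + 2)
    (List.replicate graph.length false) [start] (fun _ => False)
    (by simp)
    (by simp [List.count_replicate_self])
    (by intro j hj hm
        rw [List.getD_eq_getElem?_getD] at hm
        simp [hj] at hm)
    (by intro u hu; exact absurd hu not_false)
    (by intro u hu; exact absurd hu not_false)]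
  simp

-- ---------- B-side: the saturation loop computes reachability ----------

-- one round of B's loop
def pvRound (graph : List (List Int)) (n : Nat) (reach : PySem.Set Int) : PySem.Set Int :=
  PySem.Set.union reach (PySem.Set.ofList (pvSuccs graph n reach))

theorem pvAlt_eq_iterate (graph : List (List Int)) (start end_ : Int) :
    has_directed_path_alt graph start end_ =
      PySem.Set.contains ((pvRound graph graph.length)^[graph.length]
        (PySem.Set.ofList [start])) end_ := by
  have h : has_directed_path_alt graph start end_ =
      PySem.Set.contains ((PySem.List.pyRange 0 graph.length 1).foldl
        (fun (r : PySem.Set Int) (_ : Int) => pvRound graph graph.length r)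
        (PySem.Set.ofList [start])) end_ := rfl
  rw [h, List.foldl_const, PySem.List.length_pyRange_one]
  norm_num

theorem pvMem_round (graph : List (List Int)) (n : Nat) (reach : PySem.Set Int) (v : Int) :
    v ∈ pvRound graph n reach ↔ v ∈ reach ∨ ∃ u ∈ reach, pvE graph n u v := by
  unfold pvRound pvSuccs pvE
  rw [PySem.Set.mem_union, PySem.Set.mem_ofList]
  simp only [List.mem_flatMap, List.mem_filter, PySem.List.mem_pyRange_one,
    Bool.and_eq_true, beq_iff_eq]

theorem pvRound_mono (graph : List (List Int)) (n : Nat) (reach : PySem.Set Int) (v : Int)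
    (h : v ∈ reach) : v ∈ pvRound graph n reach :=
  (pvMem_round graph n reach v).mpr (Or.inl h)

theorem pvIter_start_mem (graph : List (List Int)) (n : Nat) (start : Int) (k : Nat) :
    start ∈ (pvRound graph n)^[k] (PySem.Set.ofList [start]) := by
  induction k with
  | zero => simp [PySem.Set.mem_ofList]
  | succ k ih =>
      rw [Function.iterate_succ_apply']
      exact pvRound_mono _ _ _ _ ih

theorem pvIter_sound (graph : List (List Int)) (n : Nat) (start : Int) (k : Nat) :
    ∀ v, v ∈ (pvRound graph n)^[k] (PySem.Set.ofList [start]) →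
      Relation.ReflTransGen (pvE graph n) start v := by
  induction k with
  | zero =>
      intro v hv
      rw [Function.iterate_zero_apply, PySem.Set.mem_ofList] at hv
      simp at hv
      subst hv
      exact Relation.ReflTransGen.refl
  | succ k ih =>
      intro v hv
      rw [Function.iterate_succ_apply', pvMem_round] at hv
      rcases hv with hv | ⟨u, hu, he⟩
      · exact ih v hv
      · exact Relation.ReflTransGen.tail (ih u hu) he

theorem pvRound_congr (graph : List (List Int)) (n : Nat) (r r' : PySem.Set Int)
    (h : ∀ x, x ∈ r ↔ x ∈ r') : ∀ x, x ∈ pvRound graph n r ↔ x ∈ pvRound graph n r' := by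
  intro x
  rw [pvMem_round, pvMem_round]
  constructor
  · rintro (hx | ⟨u, hu, he⟩)
    · exact Or.inl ((h x).mp hx)
    · exact Or.inr ⟨u, (h u).mp hu, he⟩
  · rintro (hx | ⟨u, hu, he⟩)
    · exact Or.inl ((h x).mpr hx)
    · exact Or.inr ⟨u, (h u).mpr hu, he⟩

theorem pvStationary_propagate (graph : List (List Int)) (n : Nat) (s0 : PySem.Set Int)
    (j : Nat) (hstat : ∀ x, x ∈ pvRound graph n ((pvRound graph n)^[j] s0) ↔
      x ∈ (pvRound graph n)^[j] s0) :
    ∀ d x, x ∈ (pvRound graph n)^[j + d] s0 ↔ x ∈ (pvRound graph n)^[j] s0 := by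
  intro d
  induction d with
  | zero => intro x; rfl
  | succ d ih =>
      intro x
      have : j + (d + 1) = (j + d) + 1 := by omega
      rw [this, Function.iterate_succ_apply']
      exact Iff.trans (pvRound_congr graph n _ _ ih x) (hstat x)

-- every set reached by the loop is a Nodup list whose elements are start or node indices
theorem pvIter_nodup (graph : List (List Int)) (n : Nat) (start : Int) (k : Nat) :
    ((pvRound graph n)^[k] (PySem.Set.ofList [start])).Nodup := by
  induction k with
  | zero => exact PySem.Set.nodup_ofList _
  | succ k ih =>
      rw [Function.iterate_succ_apply']
      exact PySem.Set.nodup_union _ _ ih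

theorem pvIter_subset (graph : List (List Int)) (n : Nat) (start : Int) (k : Nat) :
    ∀ v ∈ (pvRound graph n)^[k] (PySem.Set.ofList [start]),
      v = start ∨ v ∈ PySem.List.pyRange 0 n 1 := by
  induction k with
  | zero =>
      intro v hv
      rw [Function.iterate_zero_apply, PySem.Set.mem_ofList] at hv
      simp at hv
      exact Or.inl hv
  | succ k ih =>
      intro v hv
      rw [Function.iterate_succ_apply', pvMem_round] at hv
      rcases hv with hv | ⟨u, hu, he⟩
      · exact ih v hv
      · right
        rw [PySem.List.mem_pyRange_one]
        exact ⟨he.1.1, he.1.2⟩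

-- union only appends, so a non-stationary round strictly increases the length
theorem pvUnion_prefix {t : List Int} : ∀ (s : PySem.Set Int), s <+: PySem.Set.union s t := by
  induction t with
  | nil => intro s; exact List.prefix_refl s
  | cons x t ih =>
      intro s
      have h1 : s <+: PySem.Set.add s x := by
        unfold PySem.Set.add
        split
        · exact List.prefix_refl s
        · exact List.prefix_append s [x]
      exact h1.trans (ih (PySem.Set.add s x))

theorem pvRound_grow (graph : List (List Int)) (n : Nat) (r : PySem.Set Int)
    (hne : ∃ x, x ∈ pvRound graph n r ∧ x ∉ r) :
    r.length + 1 ≤ (pvRound graph n r).length := by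
  have hpre : r <+: pvRound graph n r := pvUnion_prefix r
  have hlen : r.length ≤ (pvRound graph n r).length := hpre.length_le
  by_contra hlt
  have heq : r = pvRound graph n r := hpre.eq_of_length_le (by omega)
  rcases hne with ⟨x, hx, hnx⟩
  rw [← heq] at hx
  exact hnx hx

theorem pvIter_grow (graph : List (List Int)) (n : Nat) (start : Int) (k : Nat)
    (h : ∀ j < k, ∃ x, x ∈ pvRound graph n ((pvRound graph n)^[j] (PySem.Set.ofList [start])) ∧
      x ∉ (pvRound graph n)^[j] (PySem.Set.ofList [start])) :
    k + 1 ≤ ((pvRound graph n)^[k] (PySem.Set.ofList [start])).length := by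
  induction k with
  | zero => simp [PySem.Set.ofList, PySem.Set.add, PySem.Set.empty, PySem.Set.contains]
  | succ k ih =>
      have h1 := ih (fun j hj => h j (by omega))
      have h2 := pvRound_grow graph n _ (h k (by omega))
      rw [Function.iterate_succ_apply']
      omega

theorem pvNodupLen (l l' : List Int) (h : l.Nodup) (h' : l'.Nodup) (hs : ∀ x ∈ l, x ∈ l') :
    l.length ≤ l'.length := by
  have hc := List.toFinset_card_of_nodup h
  have hc' := List.toFinset_card_of_nodup h'
  have hsub : l.toFinset ⊆ l'.toFinset := by
    intro x hx
    rw [List.mem_toFinset] at hx ⊢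
    exact hs x hx
  have := Finset.card_le_card hsub
  omega

theorem pvNodupFull (l l' : List Int) (h : l.Nodup) (h' : l'.Nodup) (hs : ∀ x ∈ l, x ∈ l')
    (hl : l'.length ≤ l.length) : ∀ x ∈ l', x ∈ l := by
  have hc := List.toFinset_card_of_nodup h
  have hc' := List.toFinset_card_of_nodup h'
  have hsub : l.toFinset ⊆ l'.toFinset := by
    intro x hx
    rw [List.mem_toFinset] at hx ⊢
    exact hs x hx
  have heq := Finset.eq_of_subset_of_card_le hsub (by omega)
  intro x hx
  have : x ∈ l.toFinset := by rw [heq]; rwa [List.mem_toFinset]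
  rwa [List.mem_toFinset] at this

-- after n rounds the set is closed under the edge relation
theorem pvIter_closed (graph : List (List Int)) (n : Nat) (start : Int) :
    ∀ u v, u ∈ (pvRound graph n)^[n] (PySem.Set.ofList [start]) → pvE graph n u v →
      v ∈ (pvRound graph n)^[n] (PySem.Set.ofList [start]) := by
  by_cases hstat : ∃ j, j < n ∧ (∀ x,
      x ∈ pvRound graph n ((pvRound graph n)^[j] (PySem.Set.ofList [start])) ↔
      x ∈ (pvRound graph n)^[j] (PySem.Set.ofList [start]))
  · rcases hstat with ⟨j, hj, hstat⟩
    have hprop := pvStationary_propagate graph n (PySem.Set.ofList [start]) j hstat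
    have hco : (pvRound graph n)^[n] (PySem.Set.ofList [start]) =
        (pvRound graph n)^[j + (n - j)] (PySem.Set.ofList [start]) := by
      congr 1
      omega
    intro u v hu he
    rw [hco, hprop (n - j) u] at hu
    have hv : v ∈ pvRound graph n ((pvRound graph n)^[j] (PySem.Set.ofList [start])) :=
      (pvMem_round graph n _ v).mpr (Or.inr ⟨u, hu, he⟩)
    rw [hco, hprop (n - j) v]
    exact (hstat v).mp hv
  · -- every round grew: the set saturates all possible elements
    push Not at hstat
    have hgrow : ∀ j < n, ∃ x,
        x ∈ pvRound graph n ((pvRound graph n)^[j] (PySem.Set.ofList [start])) ∧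
        x ∉ (pvRound graph n)^[j] (PySem.Set.ofList [start]) := by
      intro j hj
      rcases hstat j hj with ⟨x, hx⟩
      rcases hx with ⟨h1, h2⟩ | ⟨h1, h2⟩
      · exact ⟨x, h1, h2⟩
      · exact absurd (pvRound_mono graph n _ x h2) h1
    have hlen := pvIter_grow graph n start n hgrow
    have hnodup := pvIter_nodup graph n start n
    have hsub := pvIter_subset graph n start n
    -- the iterate is contained in start :: range, which has length at most n + 1
    by_cases hsr : start ∈ PySem.List.pyRange 0 n 1
    · -- then the iterate fits in the range, of length n: contradiction with length ≥ n + 1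
      exfalso
      have hle : ((pvRound graph n)^[n] (PySem.Set.ofList [start])).length ≤ n := by
        have := pvNodupLen _ (PySem.List.pyRange 0 n 1) hnodup
          (PySem.List.nodup_pyRange_one 0 n) (by
            intro x hx
            rcases hsub x hx with h | h
            · subst h; exact hsr
            · exact h)
        rwa [PySem.List.length_pyRange_one] at this
      omega
    · -- start ∉ range: the iterate is all of start :: range and hence closed
      intro u v hu he
      have hcons : (start :: PySem.List.pyRange 0 n 1).Nodup := by
        rw [List.nodup_cons]
        exact ⟨hsr, PySem.List.nodup_pyRange_one 0 n⟩
      have hfull := pvNodupFull _ (start :: PySem.List.pyRange 0 n 1) hnodup hcons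
        (by
          intro x hx
          rcases hsub x hx with h | h
          · subst h; exact List.mem_cons_self
          · exact List.mem_cons_of_mem _ h)
        (by
          have hlc : (start :: PySem.List.pyRange 0 n 1).length = n + 1 := by
            rw [List.length_cons, PySem.List.length_pyRange_one]
            omega
          omega)
      apply hfull
      exact List.mem_cons_of_mem _ ((PySem.List.mem_pyRange_one).mpr ⟨he.1.1, he.1.2⟩)

theorem pvIter_complete (graph : List (List Int)) (n : Nat) (start : Int) :
    ∀ v, Relation.ReflTransGen (pvE graph n) start v →
      v ∈ (pvRound graph n)^[n] (PySem.Set.ofList [start]) := by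
  intro v hv
  induction hv with
  | refl => exact pvIter_start_mem graph n start n
  | tail _ hstep ih => exact pvIter_closed graph n start _ _ ih hstep

theorem pvAlt_iff (graph : List (List Int)) (start end_ : Int) :
    has_directed_path_alt graph start end_ = true ↔
      Relation.ReflTransGen (pvE graph graph.length) start end_ := by
  rw [pvAlt_eq_iterate, PySem.Set.contains_iff]
  constructor
  · exact pvIter_sound graph graph.length start graph.length end_
  · exact pvIter_complete graph graph.length start end_

theorem has_directed_path_spec : Claim_equal_has_directed_path := by
  intro graph start end_ _ _
  unfold Spec_has_directed_path
  have hA := pvA_iff graph start end_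
  have hB := pvAlt_iff graph start end_
  cases hout : has_directed_path graph start end_
  · cases hout' : has_directed_path_alt graph start end_
    · rfl
    · exact absurd (hA.mpr (hB.mp hout')) (by simp [hout])
  · rw [hB.mpr (hA.mp hout)]
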